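-- pv_equiv track=rewrite | github.com/Yan-Lqyy/Structural-Isomers | core_logic.py | get_smarts_categories
-- ===== SOURCE A (Python) =====
-- def get_smarts_categories(library_data):
--     categories = {}
--     for key, data in library_data.items():
--         cat = data.get('category', 'Uncategorized')
--         if cat not in categories: categories[cat] = []
--         categories[cat].append({
--             'key': key, 'name': data.get('name', key), 'desc': data.get('desc', '')
--         })
--     for cat in categories:
--         categories[cat].sort(key=lambda x: x['name']) # Sort items within category by name
--     # Sort categories themselves by name
--     return dict(sorted(categories.items()))
-- ===== SOURCE B (Python) =====
-- def get_smarts_categories(library_data):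
--     # Build the result directly: sorted distinct categories, each paired with
--     # its name-sorted item list, via comprehensions (no incremental dict).
--     cats = sorted({d.get('category', 'Uncategorized') for d in library_data.values()})
--     return {
--         cat: sorted(
--             ({'key': k, 'name': d.get('name', k), 'desc': d.get('desc', '')}
--              for k, d in library_data.items()
--              if d.get('category', 'Uncategorized') == cat),
--             key=lambda x: x['name'])
--         for cat in cats
--     }
-- ===== Notes on version B (the rewrite author's own statement) =====
-- stated objective: simpler
-- what changed: B drops A's incremental dict grouping and in-place per-bucket sort loop: it computes the sorted set of distinct categories once and builds the result as a dict comprehension, filtering and sorting each category's items in one expression.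
import Mathlib
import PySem

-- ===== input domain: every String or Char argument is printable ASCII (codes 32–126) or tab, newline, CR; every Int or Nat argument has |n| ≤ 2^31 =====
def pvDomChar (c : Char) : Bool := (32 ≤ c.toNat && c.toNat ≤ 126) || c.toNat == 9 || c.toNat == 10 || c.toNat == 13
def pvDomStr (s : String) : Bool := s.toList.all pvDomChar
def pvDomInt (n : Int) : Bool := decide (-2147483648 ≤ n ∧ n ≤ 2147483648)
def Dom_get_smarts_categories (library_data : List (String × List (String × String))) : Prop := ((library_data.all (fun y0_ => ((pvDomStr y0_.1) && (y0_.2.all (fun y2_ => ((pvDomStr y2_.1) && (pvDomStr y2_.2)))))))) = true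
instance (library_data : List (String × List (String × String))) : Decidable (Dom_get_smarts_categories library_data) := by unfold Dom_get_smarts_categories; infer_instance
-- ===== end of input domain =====

-- B builds the result directly from the sorted set of categories, one filtered+sorted
-- comprehension per category, instead of A's incremental dict grouping plus per-bucket
-- sort loop (simpler decomposition; same result).

-- ===== PORT A =====
-- dict keys are distinct, so Python's final tuple-sort of items never compares the second
-- component: sorting by the first component (the category string) is exact; likewise every
-- built item dict contains 'name', so x['name'] is ported as getD "name" "".
def get_smarts_categories (library_data : List (String × List (String × String))) : List (String × List (List (String × String))) :=
  let categories := library_data.foldl (fun (d : PySem.Dict String (List (List (String × String)))) kv =>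
      let cat := (PySem.Dict.mk kv.2).getD "category" "Uncategorized"
      let d' := if d.contains cat then d else d.insert cat []
      d'.modify cat [] (fun v => v ++
        [[("key", kv.1), ("name", (PySem.Dict.mk kv.2).getD "name" kv.1),
          ("desc", (PySem.Dict.mk kv.2).getD "desc" "")]])) (PySem.Dict.mk [])
  let categories := categories.keys.foldl (fun d cat =>
      d.modify cat [] (fun v => PySem.List.sorted v (fun x => (PySem.Dict.mk x).getD "name" "") false)) categories
  PySem.List.sorted categories.items (fun p => p.1) false

-- ===== PORT B =====
-- the Python set comprehension over values is PySem.Set.ofList of the mapped categories;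
-- the dict comprehension keyed by the already-sorted distinct cats is a plain map.
def get_smarts_categories_alt (library_data : List (String × List (String × String))) : List (String × List (List (String × String))) :=
  let cats := PySem.List.sorted
    (PySem.Set.ofList (library_data.map (fun kv => (PySem.Dict.mk kv.2).getD "category" "Uncategorized")))
    (fun x => x) false
  cats.map (fun cat => (cat,
    PySem.List.sorted
      ((library_data.filter (fun kv => (PySem.Dict.mk kv.2).getD "category" "Uncategorized" == cat)).map
        (fun kv => [("key", kv.1), ("name", (PySem.Dict.mk kv.2).getD "name" kv.1),
                    ("desc", (PySem.Dict.mk kv.2).getD "desc" "")]))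
      (fun x => (PySem.Dict.mk x).getD "name" "") false))

-- ===== PRECONDITION & SPEC =====
def Spec_get_smarts_categories (library_data : List (String × List (String × String))) (out : List (String × List (List (String × String)))) : Prop := out = get_smarts_categories_alt library_data
instance (library_data : List (String × List (String × String))) (out : List (String × List (List (String × String)))) : Decidable (Spec_get_smarts_categories library_data out) := by unfold Spec_get_smarts_categories; infer_instance

-- ===== CLAIM (what is proved, stated in full; the proofs are below) =====
def Claim_equal_get_smarts_categories : Prop := ∀ (library_data : List (String × List (String × String))), Dom_get_smarts_categories library_data → Spec_get_smarts_categories library_data (get_smarts_categories library_data)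

-- ===== LEMMAS AND PROOFS =====

-- proof-only abbreviations for the pieces both ports compute
def pvCat (kv : String × List (String × String)) : String :=
  (PySem.Dict.mk kv.2).getD "category" "Uncategorized"
def pvName (kv : String × List (String × String)) : String :=
  (PySem.Dict.mk kv.2).getD "name" kv.1
def pvItem (kv : String × List (String × String)) : List (String × String) :=
  [("key", kv.1), ("name", pvName kv), ("desc", (PySem.Dict.mk kv.2).getD "desc" "")]
def pvNameK (x : List (String × String)) : String := (PySem.Dict.mk x).getD "name" ""
def pvGroup (l : List (String × List (String × String))) :
    PySem.Dict String (List (List (String × String))) :=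
  l.foldl (fun d kv => d.modify (pvCat kv) [] (fun v => v ++ [pvItem kv])) (PySem.Dict.mk [])
def pvBucket (l : List (String × List (String × String))) (c : String) :
    List (List (String × String)) :=
  (l.filter (fun kv => pvCat kv == c)).map pvItem

-- a dict with distinct keys is the list of its keys paired with their values
theorem pv_dict_items_eq {V : Type} (l : List (String × V)) (dflt : V)
    (h : (l.map Prod.fst).Nodup) :
    l = (l.map Prod.fst).map (fun k => (k, (PySem.Dict.mk l).getD k dflt)) := by
  induction l with
  | nil => rfl
  | cons kv l ih =>
    simp only [List.map_cons, List.nodup_cons] at h ⊢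
    refine List.cons_eq_cons.mpr ⟨?_, ?_⟩
    · simp [PySem.Dict.getD, PySem.Dict.get?, List.find?]
    · have hrec := ih h.2
      conv_lhs => rw [hrec]
      apply List.map_congr_left
      intro k hk
      have hne : kv.1 ≠ k := fun he => h.1 (he ▸ hk)
      simp only [PySem.Dict.getD, PySem.Dict.get?, List.find?]
      have : (kv.1 == k) = false := by simp [hne]
      simp [this]

theorem pv_dict_items_eq' {V : Type} (d : PySem.Dict String V) (dflt : V) (h : d.keys.Nodup) :
    d.items = d.keys.map (fun k => (k, d.getD k dflt)) := by
  cases d with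
  | mk l => exact pv_dict_items_eq l dflt h

-- A's "if cat not in categories: categories[cat] = []" step collapses into a bare modify
theorem pv_step_eq {V : Type} (d : PySem.Dict String (List V)) (c : String) (x : V) :
    ((if d.contains c then d else d.insert c []).modify c [] (fun v => v ++ [x])) =
      d.modify c [] (fun v => v ++ [x]) := by
  by_cases hc : d.contains c = true
  · simp [hc]
  · simp only [Bool.not_eq_true] at hc
    simp only [hc, Bool.false_eq_true, if_false]
    have hget : d.getD c [] = ([] : List V) := by
      cases d with
      | mk l =>
        simp only [PySem.Dict.contains] at hc
        have hall := List.any_eq_false.mp hc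
        simp only [PySem.Dict.getD, PySem.Dict.get?]
        rw [List.find?_eq_none.mpr (fun p hp => hall p hp)]
        rfl
    simp only [PySem.Dict.modify, PySem.Dict.getD_insert_self, hget]
    cases d with
    | mk l =>
      have hcl : (PySem.Dict.mk l).contains c = false := hc
      have hfresh : forall p, p ∈ l -> (p.1 == c) = false := by
        intro p hp
        simp only [PySem.Dict.contains] at hcl
        have hall := List.any_eq_false.mp hcl
        simpa using hall p hp
      have hc2 : (PySem.Dict.mk (l ++ [(c, ([] : List V))])).contains c = true := by
        simp [PySem.Dict.contains]
      simp only [PySem.Dict.insert, hcl, Bool.false_eq_true, if_false, hc2, if_pos]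
      congr 1
      rw [List.map_append,
        show List.map (fun p => if (p.1 == c) = true then (c, [] ++ [x]) else p) l = l from by
          conv_rhs => rw [<- List.map_id l]
          exact List.map_congr_left (fun p hp => by simp [hfresh p hp])]
      simp

-- the grouping fold of port A is pvGroup, read off through getD
theorem pv_group_getD (l : List (String × List (String × String))) (c : String) :
    (pvGroup l).getD c [] = pvBucket l c := by
  unfold pvGroup pvBucket
  have : l.foldl (fun d kv => d.modify (pvCat kv) [] (fun v => v ++ [pvItem kv])) (PySem.Dict.mk []) =
      (l.map (fun kv => (pvCat kv, pvItem kv))).foldl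
        (fun d p => d.modify p.1 [] (fun v => v ++ [p.2])) (PySem.Dict.mk []) := by
    rw [List.foldl_map]
  rw [this, PySem.Dict.getD_foldl_modify_append]
  have hempty : (PySem.Dict.mk ([] : List (String × List (List (String × String))))).getD c [] = [] := rfl
  rw [hempty, List.filter_map]
  simp [List.map_map, Function.comp_def]

theorem pv_group_keys (l : List (String × List (String × String))) :
    (pvGroup l).keys = PySem.Set.ofList (l.map pvCat) := by
  unfold pvGroup
  rw [PySem.Dict.keys_foldl_modify_key l pvCat [] (fun _ kv v => v ++ [pvItem kv])]
  rw [PySem.Set.update_eq_append_filter]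
  have h0 : ((PySem.Dict.mk ([] : List (String × List (List (String × String))))).keys) = [] := rfl
  rw [h0, List.nil_append]
  exact List.filter_eq_self.mpr (fun a _ => rfl)

-- the in-place per-category sort loop, read off through getD
theorem pv_sortloop_getD (ks : List String)
    (F : List (List (String × String)) -> List (List (String × String)))
    (d : PySem.Dict String (List (List (String × String)))) (c : String) (h : ks.Nodup) :
    (ks.foldl (fun d c => d.modify c [] F) d).getD c [] =
      if c ∈ ks then F (d.getD c []) else d.getD c [] := by
  induction ks generalizing d with
  | nil => simp
  | cons k ks ih =>
    simp only [List.nodup_cons] at h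
    simp only [List.foldl_cons, ih _ h.2, PySem.Dict.getD_modify]
    by_cases hck : c = k
    · subst hck
      simp [h.1]
    · simp [hck, List.mem_cons]

theorem pv_sortloop_keys (ks : List String)
    (F : List (List (String × String)) -> List (List (String × String)))
    (d : PySem.Dict String (List (List (String × String)))) (h : forall k, k ∈ ks -> k ∈ d.keys) :
    (ks.foldl (fun d c => d.modify c [] F) d).keys = d.keys := by
  have := PySem.Dict.keys_foldl_modify_key ks (fun c => c) [] (fun _ _ v => F v) d
  simp only [List.map_id'] at this
  rw [this, PySem.Set.update_eq_append_filter]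
  have hfilter : (PySem.Set.ofList ks).filter (fun y => !(PySem.Set.contains d.keys y)) = [] := by
    rw [List.filter_eq_nil_iff]
    intro a ha
    have hm : a ∈ d.keys := h a ((PySem.Set.mem_ofList ks a).mp ha)
    have hcont : PySem.Set.contains d.keys a = true := List.contains_iff_mem.mpr hm
    simp only [hcont, Bool.not_true]
    simp
  rw [hfilter]
  simp

-- port A, reshaped through the proof abbreviations
theorem pv_portA_eq (l : List (String × List (String × String))) :
    get_smarts_categories l =
      PySem.List.sorted
        ((pvGroup l).keys.foldl
          (fun d c => d.modify c [] (fun v => PySem.List.sorted v pvNameK false)) (pvGroup l)).items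
        (fun p => p.1) false := by
  unfold get_smarts_categories
  have hfold : l.foldl (fun (d : PySem.Dict String (List (List (String × String)))) kv =>
      let cat := (PySem.Dict.mk kv.2).getD "category" "Uncategorized"
      let d' := if d.contains cat then d else d.insert cat []
      d'.modify cat [] (fun v => v ++
        [[("key", kv.1), ("name", (PySem.Dict.mk kv.2).getD "name" kv.1),
          ("desc", (PySem.Dict.mk kv.2).getD "desc" "")]])) (PySem.Dict.mk []) = pvGroup l := by
    unfold pvGroup
    apply PySem.List.foldl_congr_mem
    intro acc kv _
    exact pv_step_eq acc (pvCat kv) (pvItem kv)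
  rw [hfold]
  rfl

-- port B is literally the sorted key list mapped to its sorted buckets
theorem pv_portB_eq (l : List (String × List (String × String))) :
    get_smarts_categories_alt l =
      (PySem.List.sorted (PySem.Set.ofList (l.map pvCat)) (fun x => x) false).map
        (fun c => (c, PySem.List.sorted (pvBucket l c) pvNameK false)) := rfl

-- ===== VERDICT (by name: the statement is the Claim_ definition above) =====
theorem get_smarts_categories_spec : Claim_equal_get_smarts_categories := by
  intro l _
  unfold Spec_get_smarts_categories
  rw [pv_portA_eq, pv_portB_eq]
  set KA : List String := PySem.Set.ofList (l.map pvCat) with hKA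
  set SB : String -> List (List (String × String)) :=
    fun c => PySem.List.sorted (pvBucket l c) pvNameK false with hSB
  set ys : List (String × List (List (String × String))) :=
    (PySem.List.sorted KA (fun x => x) false).map (fun c => (c, SB c)) with hys
  have hKAnodup : KA.Nodup := PySem.Set.nodup_ofList _
  have hyspair : ys.Pairwise (fun a b => a.1 < b.1) := by
    rw [hys, List.pairwise_map]
    exact PySem.List.sorted_ofList_pairwise_lt (l.map pvCat)
  -- A's result equals ys
  set d2 := (pvGroup l).keys.foldl
    (fun d c => d.modify c [] (fun v => PySem.List.sorted v pvNameK false)) (pvGroup l) with hd2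
  have hkeys : d2.keys = KA := by
    rw [hd2, pv_sortloop_keys _ _ _ (fun k hk => hk), pv_group_keys]
  have hitems : d2.items = KA.map (fun c => (c, SB c)) := by
    rw [pv_dict_items_eq' d2 [] (by rw [hkeys]; exact hKAnodup), hkeys]
    apply List.map_congr_left
    intro c hc
    have : d2.getD c [] = SB c := by
      rw [hd2, pv_sortloop_getD _ _ _ _ (by rw [pv_group_keys]; exact hKAnodup)]
      rw [pv_group_keys, if_pos (by exact hc), pv_group_getD]
    rw [this]
  have hA : PySem.List.sorted d2.items (fun p => p.1) false = ys := by
    apply PySem.List.sorted_eq_of_perm_of_pairwise_lt _ _ _ _ hyspair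
    rw [hitems, hys]
    exact (PySem.List.sorted_perm KA (fun x => x) false).map _
  exact hA
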